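-- pv_equiv track=rewrite | github.com/Songbinbin111/dm_lab2 | task4_coref_resolution/evaluator.py | _find_matching_auto_result
-- ===== SOURCE A (Python) =====
-- from typing import Dict, List, Tuple, Any
--
-- def _find_matching_auto_result(auto_resolutions: List[Dict], manual_ann: Dict) -> Dict:
--     """
--     找到匹配的自动消解结果
--     增加基于位置的匹配逻辑，提高准确性
--     """
--     target_pronoun = manual_ann.get('pronoun')
--     target_position = manual_ann.get('position')
--
--     # 1. 优先尝试完全匹配（代词 + 位置）
--     if target_position is not None:
--         for auto_res in auto_resolutions:
--             # 自动结果可能没有位置信息，或者位置信息格式不同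
--             # 假设 auto_res 也有 position 字段（在 extraction 阶段保留）
--             # 注意：auto_resolution_results.json 中的结构是 sentences -> pronouns (带位置) 和 auto_resolution (可能不带位置)
--             # 我们需要检查 auto_resolution 是否保留了位置信息
--
--             # 如果 auto_res 中有 position，则进行匹配
--             if auto_res.get('pronoun') == target_pronoun and auto_res.get('position') == target_position:
--                 return auto_res
--
--     # 2. 如果没有位置匹配，尝试基于代词内容的匹配
--     # 如果句子中有多个相同的代词，这种方法可能会匹配错误，但在没有位置信息的情况下是唯一的选择
--     candidates = [res for res in auto_resolutions if res.get('pronoun') == target_pronoun]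
--
--     if len(candidates) == 1:
--         return candidates[0]
--     elif len(candidates) > 1:
--         # 如果有多个相同代词，且无法通过位置区分
--         # 这里简单返回第一个，或者打印警告
--         # 理想情况下应该在 pipeline 中传递位置信息
--         return candidates[0]
--
--     return None
-- ===== SOURCE B (Python) =====
-- def _find_matching_auto_result(auto_resolutions, manual_ann):
--     """Single pass: return the first exact (pronoun+position) match immediately;
--     otherwise remember the first pronoun-only match and return it at the end."""
--     target_pronoun = manual_ann.get('pronoun')
--     target_position = manual_ann.get('position')
--     candidate = None
--     for auto_res in auto_resolutions:
--         if auto_res.get('pronoun') == target_pronoun: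
--             if target_position is not None and auto_res.get('position') == target_position:
--                 return auto_res
--             if candidate is None:
--                 candidate = auto_res
--     return candidate
-- ===== Notes on version B (the rewrite author's own statement) =====
-- stated objective: simpler
-- what changed: Replaces A's two separate passes (an exact pronoun+position scan followed by building a full candidates list and casing on its length) with a single loop that returns an exact match immediately and otherwise keeps only the first pronoun-only match in one variable.
import Mathlib
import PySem

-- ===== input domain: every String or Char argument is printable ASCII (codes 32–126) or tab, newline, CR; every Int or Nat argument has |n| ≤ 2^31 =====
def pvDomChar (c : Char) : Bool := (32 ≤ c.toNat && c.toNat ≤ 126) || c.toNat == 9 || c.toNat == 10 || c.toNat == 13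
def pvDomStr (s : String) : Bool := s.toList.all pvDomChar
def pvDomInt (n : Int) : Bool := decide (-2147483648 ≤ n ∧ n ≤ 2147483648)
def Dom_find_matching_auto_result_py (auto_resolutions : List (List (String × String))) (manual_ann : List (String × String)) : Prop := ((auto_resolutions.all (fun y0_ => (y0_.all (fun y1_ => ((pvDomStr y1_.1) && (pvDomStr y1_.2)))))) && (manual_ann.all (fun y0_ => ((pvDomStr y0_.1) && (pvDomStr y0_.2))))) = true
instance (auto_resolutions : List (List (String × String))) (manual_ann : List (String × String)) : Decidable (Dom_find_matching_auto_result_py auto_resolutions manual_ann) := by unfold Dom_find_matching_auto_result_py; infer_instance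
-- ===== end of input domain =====

-- B is a simpler single-pass decomposition of A (same O(n) cost); return values proved equal on all inputs.

-- d.get(k): first match in the association list (dicts are assoc lists in insertion order)
def pvGetKey (d : List (String × String)) (k : String) : Option String :=
  (d.find? (fun p => p.1 == k)).map (·.2)

-- ===== PORT A =====
-- two passes: an exact (pronoun+position) scan, then the pronoun-only candidates list
def find_matching_auto_result_py (auto_resolutions : List (List (String × String))) (manual_ann : List (String × String)) : Option (List (String × String)) :=
  let target_pronoun := pvGetKey manual_ann "pronoun"
  let target_position := pvGetKey manual_ann "position"
  let exact : Option (List (String × String)) :=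
    if target_position.isSome then
      auto_resolutions.find? (fun r => pvGetKey r "pronoun" == target_pronoun && pvGetKey r "position" == target_position)
    else none
  match exact with
  | some r => some r
  | none =>
    let candidates := auto_resolutions.filter (fun r => pvGetKey r "pronoun" == target_pronoun)
    if candidates.length == 1 then candidates[0]?
    else if candidates.length > 1 then candidates[0]?
    else none

-- ===== PORT B =====
-- one loop: return an exact match at once, keep the first pronoun-only match as candidate
def find_matching_auto_result_py_altLoop (tp pos : Option String) :
    List (List (String × String)) → Option (List (String × String)) → Option (List (String × String))
  | [], cand => cand
  | r :: rest, cand =>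
    if pvGetKey r "pronoun" == tp then
      if pos.isSome && pvGetKey r "position" == pos then some r
      else find_matching_auto_result_py_altLoop tp pos rest (if cand.isNone then some r else cand)
    else find_matching_auto_result_py_altLoop tp pos rest cand

def find_matching_auto_result_py_alt (auto_resolutions : List (List (String × String))) (manual_ann : List (String × String)) : Option (List (String × String)) :=
  find_matching_auto_result_py_altLoop (pvGetKey manual_ann "pronoun") (pvGetKey manual_ann "position") auto_resolutions none

-- ===== PRECONDITION & SPEC =====
def Spec_find_matching_auto_result_py (auto_resolutions : List (List (String × String))) (manual_ann : List (String × String)) (out : Option (List (String × String))) : Prop := out = find_matching_auto_result_py_alt auto_resolutions manual_ann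
instance (auto_resolutions : List (List (String × String))) (manual_ann : List (String × String)) (out : Option (List (String × String))) : Decidable (Spec_find_matching_auto_result_py auto_resolutions manual_ann out) := by unfold Spec_find_matching_auto_result_py; infer_instance

-- ===== CLAIM (what is proved, stated in full; the proofs are below) =====
def Claim_equal_find_matching_auto_result_py : Prop := ∀ (auto_resolutions : List (List (String × String))) (manual_ann : List (String × String)), Dom_find_matching_auto_result_py auto_resolutions manual_ann → Spec_find_matching_auto_result_py auto_resolutions manual_ann (find_matching_auto_result_py auto_resolutions manual_ann)

-- ===== LEMMAS AND PROOFS =====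

-- characterisation of B's loop: exact match wins, else the saved candidate, else the first pronoun match
theorem altLoop_eq (tp pos : Option String) (xs : List (List (String × String))) (cand : Option (List (String × String))) :
    find_matching_auto_result_py_altLoop tp pos xs cand =
      match xs.find? (fun r => pvGetKey r "pronoun" == tp && (pos.isSome && pvGetKey r "position" == pos)) with
      | some r => some r
      | none => cand.orElse (fun _ => xs.find? (fun r => pvGetKey r "pronoun" == tp)) := by
  induction xs generalizing cand with
  | nil => cases cand <;> simp [find_matching_auto_result_py_altLoop, Option.orElse]
  | cons r rest ih =>
    simp only [find_matching_auto_result_py_altLoop, List.find?]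
    by_cases hp : (pvGetKey r "pronoun" == tp) = true
    · by_cases hx : (pos.isSome && pvGetKey r "position" == pos) = true
      · simp [hp, hx]
      · simp only [hp, hx, if_true, Bool.true_and, ih]
        cases cand <;> simp [Option.orElse]
    · simp only [hp, Bool.false_and, ih]
      rfl

theorem head?_filter_eq_find? {α : Type} (p : α → Bool) (xs : List α) :
    (xs.filter p)[0]? = xs.find? p := by
  induction xs with
  | nil => rfl
  | cons x xs ih =>
    by_cases h : p x = true <;> simp [List.find?, h, ih]

-- A's length-1 / length>1 / empty cascade on the filtered list is just the first match
theorem cascade_eq_find? {α : Type} (p : α → Bool) (xs : List α) :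
    (if ((xs.filter p).length == 1) = true then (xs.filter p)[0]?
     else if (xs.filter p).length > 1 then (xs.filter p)[0]? else none) = xs.find? p := by
  rw [← head?_filter_eq_find?]
  rcases h : xs.filter p with _ | ⟨a, t⟩
  · simp
  · rcases t with _ | ⟨b, u⟩ <;> simp

-- ===== VERDICT (by name: the statement is the Claim_ definition above) =====
theorem find_matching_auto_result_py_spec : Claim_equal_find_matching_auto_result_py := by
  intro auto manual _
  unfold Spec_find_matching_auto_result_py find_matching_auto_result_py find_matching_auto_result_py_alt
  rw [altLoop_eq]
  set tp := pvGetKey manual "pronoun"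
  cases hpos : pvGetKey manual "position" with
  | none =>
    simp only [Option.isSome_none, Bool.false_eq_true, if_false, Bool.false_and, Bool.and_false]
    have hfind : auto.find? (fun _ => false) = none := by
      apply List.find?_eq_none.mpr; intro x _; simp
    rw [hfind]
    simpa using cascade_eq_find? (fun r => pvGetKey r "pronoun" == tp) auto
  | some v =>
    have hpred : (fun r => pvGetKey r "pronoun" == tp && ((some v).isSome && pvGetKey r "position" == some v))
        = (fun r => pvGetKey r "pronoun" == tp && pvGetKey r "position" == some v) := by
      funext r; simp
    rw [hpred]
    simp only [Option.isSome_some, if_true]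
    rcases hE : auto.find? (fun r => pvGetKey r "pronoun" == tp && pvGetKey r "position" == some v) with _ | ⟨e⟩
    · simpa using cascade_eq_find? (fun r => pvGetKey r "pronoun" == tp) auto
    · rfl
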